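-- pv_equiv track=rewrite | github.com/weixian-zhang/AlgosAmigos | src/DSA/Codility-Practices/PassingCars.py | solution
-- ===== SOURCE A (Python) =====
-- def solution(A):
--     # Implement your solution here
--
--     if len(A) == 1:
--         return 0
--
--     passingCars = 0
--     lanes = {}
--     for idx, x in enumerate(A):
--         lanes[idx] = x
--
--     carPairs = []
--
--     for i in range(len(A)):
--         for j in range(i + 1,len(A)):
--             if A[i] == 1:
--                 break
--             if A[i] < A[j]:
--                 carPairs.append((i, j))
--
--     for _, cp in enumerate(carPairs):
--
--         p = cp[0]
--         q = cp[1]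
--
--         if (lanes[p] == 0 and lanes[q] == 1 or
--             lanes[p] == 1 and lanes[q] == 0):
--             passingCars += 1
--
--         if passingCars > 1000000000:
--             return -1
--
--     return passingCars
-- ===== SOURCE B (Python) =====
-- def solution(A):
--     # One pass: for each 1 encountered, add the number of 0s seen before it.
--     zeros = 0
--     pairs = 0
--     for x in A:
--         if x == 0:
--             zeros += 1
--         elif x == 1:
--             pairs += zeros
--     return -1 if pairs > 1000000000 else pairs
-- ===== Notes on version B (the rewrite author's own statement) =====
-- stated objective: faster
-- what changed: Replaced the quadratic pair-enumeration (build an index dict, collect all increasing index pairs, then filter/count them with an early -1 cap) by a single pass that keeps a running count of zeros seen and adds it at each 1, with the -1 cap checked once at the end.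
import Mathlib
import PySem

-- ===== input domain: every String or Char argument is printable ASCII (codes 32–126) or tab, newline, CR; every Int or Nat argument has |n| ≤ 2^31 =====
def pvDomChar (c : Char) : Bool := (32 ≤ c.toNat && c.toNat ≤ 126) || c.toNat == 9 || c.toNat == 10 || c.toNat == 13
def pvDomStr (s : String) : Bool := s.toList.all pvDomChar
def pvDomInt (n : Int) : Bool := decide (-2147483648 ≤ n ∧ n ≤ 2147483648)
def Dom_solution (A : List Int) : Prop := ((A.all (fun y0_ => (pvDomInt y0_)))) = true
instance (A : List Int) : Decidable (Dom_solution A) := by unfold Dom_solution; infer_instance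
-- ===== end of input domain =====

-- B replaces A's quadratic pair enumeration by one pass counting zeros seen so far (asymptotically faster).


-- ===== PORT A =====
-- inner loop 'for j in range(i+1, len(A)): if A[i]==1: break; if A[i]<A[j]: carPairs.append((i,j))'
def solInner (A : List Int) (i : Int) : List Int → List (Int × Int)
  | [] => []
  | j :: rest =>
    if PySem.List.pyGetD A i 0 = 1 then []
    else if PySem.List.pyGetD A i 0 < PySem.List.pyGetD A j 0 then
      (i, j) :: solInner A i rest
    else solInner A i rest

-- final loop 'for _, cp in enumerate(carPairs): …' with its early 'return -1'
-- (lanes[p] is ported as getD _ 0: every key looked up was inserted, so the default is never read)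
def solCount (lanes : PySem.Dict Int Int) : List (Int × Int) → Int → Int
  | [], pc => pc
  | cp :: rest, pc =>
    let p := cp.1
    let q := cp.2
    let pc' := if (lanes.getD p 0 = 0 ∧ lanes.getD q 0 = 1) ∨
                  (lanes.getD p 0 = 1 ∧ lanes.getD q 0 = 0) then pc + 1 else pc
    if pc' > 1000000000 then -1 else solCount lanes rest pc'

def solution (A : List Int) : Int :=
  if (A.length : Int) = 1 then 0
  else
    let lanes := (PySem.List.enumerate A).foldl (fun d p => d.insert p.1 p.2) PySem.Dict.empty
    let carPairs := (PySem.List.pyRange 0 (A.length : Int) 1).foldl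
        (fun cps i => cps ++ solInner A i (PySem.List.pyRange (i + 1) (A.length : Int) 1)) []
    solCount lanes carPairs 0

-- ===== PORT B =====
def solution_alt (A : List Int) : Int :=
  let st := A.foldl (fun (s : Int × Int) x =>
      if x = 0 then (s.1 + 1, s.2)
      else if x = 1 then (s.1, s.2 + s.1)
      else s) (0, 0)
  if st.2 > 1000000000 then -1 else st.2

-- ===== PRECONDITION & SPEC =====
def Spec_solution (A : List Int) (out : Int) : Prop := out = solution_alt A
instance (A : List Int) (out : Int) : Decidable (Spec_solution A out) := by unfold Spec_solution; infer_instance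

-- ===== CLAIM (what is proved, stated in full; the proofs are below) =====
def Claim_equal_solution : Prop := ∀ (A : List Int), Dom_solution A → Spec_solution A (solution A)

-- ===== LEMMAS AND PROOFS =====

-- the number of 0-before-1 pairs, structurally
def onesOf (l : List Int) : Int := (l.countP (fun x => decide (x = 1)) : Int)

def cnt : List Int → Int
  | [] => 0
  | x :: xs => (if x = 0 then onesOf xs else 0) + cnt xs

-- B's fold computes (zeros, pairs)
theorem foldB (l : List Int) (z p : Int) :
    l.foldl (fun (s : Int × Int) x =>
      if x = 0 then (s.1 + 1, s.2)
      else if x = 1 then (s.1, s.2 + s.1)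
      else s) (z, p)
    = (z + (l.countP (fun x => decide (x = 0)) : Int), p + z * onesOf l + cnt l) := by
  induction l generalizing z p with
  | nil => simp [onesOf, cnt]
  | cons x xs ih =>
    by_cases h0 : x = 0
    · simp only [List.foldl_cons, h0, ih, onesOf, cnt, List.countP_cons,
        Prod.mk.injEq]
      norm_num
      constructor <;> ring
    · by_cases h1 : x = 1
      · simp only [List.foldl_cons, h1, ih, onesOf, cnt,
          List.countP_cons, Prod.mk.injEq]
        norm_num
        ring
      · simp only [List.foldl_cons, if_neg h0, if_neg h1, ih, onesOf, cnt,
          List.countP_cons, Prod.mk.injEq]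
        norm_num [h0, h1]

theorem altB (A : List Int) :
    solution_alt A = if cnt A > 1000000000 then -1 else cnt A := by
  simp [solution_alt, foldB]

-- predicate the final loop of A counts
def laneHit (lanes : PySem.Dict Int Int) (cp : Int × Int) : Bool :=
  decide ((lanes.getD cp.1 0 = 0 ∧ lanes.getD cp.2 0 = 1) ∨
          (lanes.getD cp.1 0 = 1 ∧ lanes.getD cp.2 0 = 0))

theorem solCount_eq (lanes : PySem.Dict Int Int) (cps : List (Int × Int)) (pc : Int)
    (h0 : 0 ≤ pc) (h1 : pc ≤ 1000000000) :
    solCount lanes cps pc =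
      if pc + (cps.countP (laneHit lanes) : Int) > 1000000000 then -1
      else pc + (cps.countP (laneHit lanes) : Int) := by
  induction cps generalizing pc with
  | nil => simp [solCount]; omega
  | cons cp rest ih =>
    by_cases h : (lanes.getD cp.1 0 = 0 ∧ lanes.getD cp.2 0 = 1) ∨
                 (lanes.getD cp.1 0 = 1 ∧ lanes.getD cp.2 0 = 0)
    · have hl : laneHit lanes cp = true := by simp [laneHit, h]
      simp only [solCount, if_pos h, List.countP_cons, hl]
      by_cases hb : pc + 1 > 1000000000
      · have : pc + ((rest.countP (laneHit lanes) : Int) + 1) > 1000000000 := by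
          have := Int.natCast_nonneg (rest.countP (laneHit lanes))
          omega
        simp only [if_pos hb]
        push_cast
        omega
      · rw [if_neg hb, ih (pc + 1) (by omega) (by omega)]
        push_cast
        split_ifs <;> first | rfl | omega
    · have hl : laneHit lanes cp = false := by simp [laneHit, h]
      simp only [solCount, if_neg h, List.countP_cons, hl]
      rw [if_neg (by omega : ¬ pc > 1000000000), ih pc h0 h1]
      simp

-- the lanes dict built from enumerate(A) looks up position k as A[k]
theorem lanes_getD (A : List Int) (s k : Int) (d : PySem.Dict Int Int) :
    ((PySem.List.enumerate A s).foldl (fun d p => d.insert p.1 p.2) d).getD k 0 =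
      if s ≤ k ∧ k < s + A.length then PySem.List.pyGetD A (k - s) 0 else d.getD k 0 := by
  induction A generalizing s d with
  | nil =>
    simp only [PySem.List.enumerate_nil, List.foldl_nil, List.length_nil]
    rw [if_neg (by push_cast; omega)]
  | cons x xs ih =>
    rw [PySem.List.enumerate_cons]
    simp only [List.foldl_cons]
    rw [ih]
    by_cases h1 : s + 1 ≤ k ∧ k < (s + 1) + xs.length
    · rw [if_pos h1, if_pos (by simp only [List.length_cons]; push_cast; omega)]
      obtain ⟨h1a, h1b⟩ := h1
      rw [PySem.List.pyGetD_eq_getElem xs 0 (by omega) (by omega),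
          PySem.List.pyGetD_eq_getElem (x :: xs) 0 (by omega)
            (by simp only [List.length_cons]; push_cast; omega)]
      have ht : (k - s).toNat = (k - (s + 1)).toNat + 1 := by omega
      simp [ht]
    · rw [if_neg h1, PySem.Dict.getD_insert]
      by_cases hk : k = s
      · rw [if_pos hk, if_pos (by simp only [List.length_cons]; push_cast; omega), hk]
        simp [PySem.List.pyGetD_zero_cons]
      · rw [if_neg hk, if_neg (by simp only [List.length_cons]; push_cast at h1 ⊢; omega)]

def lanesOf (A : List Int) : PySem.Dict Int Int :=
  (PySem.List.enumerate A).foldl (fun d p => d.insert p.1 p.2) PySem.Dict.empty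

theorem lanesOf_def (A : List Int) :
    (PySem.List.enumerate A).foldl (fun d p => d.insert p.1 p.2) PySem.Dict.empty = lanesOf A := rfl

theorem lanesOf_getD (A : List Int) (k : Int) (h0 : 0 ≤ k) (h1 : k < A.length) :
    (lanesOf A).getD k 0 = PySem.List.pyGetD A k 0 := by
  rw [lanesOf, lanes_getD, if_pos (by omega)]
  norm_num

theorem solInner_eq_of_ne (A : List Int) (i : Int) (js : List Int)
    (h : PySem.List.pyGetD A i 0 ≠ 1) :
    solInner A i js
      = (js.filter (fun j => decide (PySem.List.pyGetD A i 0 < PySem.List.pyGetD A j 0))).map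
          (fun j => (i, j)) := by
  induction js with
  | nil => simp [solInner]
  | cons j rest ih =>
    rw [solInner, if_neg h]
    by_cases hc : PySem.List.pyGetD A i 0 < PySem.List.pyGetD A j 0
    · rw [if_pos hc]
      simp [hc, ih]
    · rw [if_neg hc]
      simp [hc, ih]

theorem solInner_eq_of_eq (A : List Int) (i : Int) (js : List Int)
    (h : PySem.List.pyGetD A i 0 = 1) : solInner A i js = [] := by
  cases js <;> simp [solInner, h]

theorem chunk_count (A : List Int) (m : Nat) (hm : m < A.length) :
    (solInner A (m : Int) (PySem.List.pyRange ((m : Int) + 1) (A.length : Int) 1)).countP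
        (laneHit (lanesOf A))
      = if PySem.List.pyGetD A (m : Int) 0 = 0
        then (A.drop (m + 1)).countP (fun x => decide (x = 1)) else 0 := by
  by_cases h1 : PySem.List.pyGetD A (m : Int) 0 = 1
  · rw [solInner_eq_of_eq A _ _ h1, if_neg (by rw [h1]; norm_num)]
    simp
  · rw [solInner_eq_of_ne A _ _ h1, List.countP_map, List.countP_filter]
    by_cases h0 : PySem.List.pyGetD A (m : Int) 0 = 0
    · rw [if_pos h0]
      rw [List.countP_congr (q := fun j => decide (PySem.List.pyGetD A j 0 = 1))
        (by
          intro j hj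
          obtain ⟨hj1, hj2⟩ := (PySem.List.mem_pyRange_one).1 hj
          simp only [Function.comp, laneHit]
          rw [lanesOf_getD A (m : Int) (by omega) (by omega),
              lanesOf_getD A j (by omega) (by omega)]
          simp only [Bool.and_eq_true, decide_eq_true_eq]
          omega)]
      have hcomp : (fun j => decide (PySem.List.pyGetD A j 0 = 1))
          = (fun v => decide (v = 1)) ∘ (fun j => PySem.List.pyGetD A j 0) := rfl
      rw [hcomp, ← List.countP_map, PySem.List.map_pyGetD_pyRange' A 0 (by omega)]
      norm_num
    · rw [if_neg h0]
      rw [List.countP_eq_zero.mpr]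
      intro j hj
      obtain ⟨hj1, hj2⟩ := (PySem.List.mem_pyRange_one).1 hj
      simp only [Function.comp, laneHit]
      rw [lanesOf_getD A (m : Int) (by omega) (by omega),
          lanesOf_getD A j (by omega) (by omega)]
      simp only [Bool.and_eq_true, decide_eq_true_eq]
      omega

theorem flat_countP {α β : Type} (g : α → List β) (p : β → Bool) (l : List α) :
    ((List.flatMap g l).countP p : Int) = (l.map (fun i => ((g i).countP p : Int))).sum := by
  induction l with
  | nil => simp
  | cons x xs ih =>
    simp only [List.flatMap_cons, List.countP_append, List.map_cons, List.sum_cons, ← ih]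
    push_cast
    ring

theorem range_sum (A : List Int) : ∀ (k m : Nat), A.length - m = k → m ≤ A.length →
    ((PySem.List.pyRange (m : Int) (A.length : Int) 1).map
        (fun i => ((solInner A i (PySem.List.pyRange (i + 1) (A.length : Int) 1)).countP
          (laneHit (lanesOf A)) : Int))).sum = cnt (A.drop m) := by
  intro k
  induction k with
  | zero =>
    intro m hk hm
    have hme : m = A.length := by omega
    subst hme
    rw [PySem.List.pyRange_one_eq_nil (by omega)]
    simp [cnt]
  | succ k ih =>
    intro m hk hm
    have hmlt : m < A.length := by omega
    rw [PySem.List.pyRange_one_cons (by exact_mod_cast hmlt), List.map_cons, List.sum_cons,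
      chunk_count A m hmlt]
    have hcast : (m : Int) + 1 = ((m + 1 : Nat) : Int) := by push_cast; ring
    rw [hcast, ih (m + 1) (by omega) (by omega),
      List.drop_eq_getElem_cons hmlt, cnt,
      PySem.List.pyGetD_eq_getElem A 0 (by omega) (by exact_mod_cast hmlt)]
    simp only [Int.toNat_natCast, onesOf]
    split_ifs <;> simp

theorem solution_eq (A : List Int) :
    solution A = if cnt A > 1000000000 then -1 else cnt A := by
  by_cases h1 : (A.length : Int) = 1
  · rw [solution, if_pos h1]
    have hl : A.length = 1 := by exact_mod_cast h1
    rcases A with _ | ⟨x, _ | ⟨y, t⟩⟩ <;> simp_all [cnt, onesOf]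
  · simp only [solution]
    rw [if_neg h1, lanesOf_def, PySem.List.foldl_append_eq_flatMap, List.nil_append,
      solCount_eq _ _ 0 le_rfl (by norm_num), flat_countP]
    have hr := range_sum A A.length 0 (by omega) (by omega)
    simp only [Nat.cast_zero, List.drop_zero] at hr
    rw [hr]
    simp

-- ===== VERDICT (by name: the statement is the Claim_ definition above) =====
theorem solution_spec : Claim_equal_solution := by
  intro A _
  show solution A = solution_alt A
  rw [solution_eq, altB]
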